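-- pv_equiv track=rewrite | github.com/belhaghassan/CPSC-323-Assignment-2 | Lexer.py | FSM
-- ===== SOURCE A (Python) =====
-- def FSM(token):
--   # d = {0 - 9}
--   # a = {a-z, A-Z}
--
--   # Sigma - {a,d,.,_,$}
--   # Q = {0,1,2,3,4}
--   # q(0) - state 1
--   # F - {2,3,4}
--
--   # N - stateTable
--   stateTable = [[0, "a", "d", ".", "_", "$"],
--                 [1,   2,   3,   0,   0,   0],        # 1st Character
--                 [2,   2,   2,   0,   2,   2],        # IDENTIFIERS (ACCEPTING STATE)
--                 [3,   0,   3,   4,   0,   0],        # INTEGERS (ACCEPTING STATE)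
--                 [4,   0,   4,   0,   0,   0]]        # REAL NUMBERS (ACCEPTING STATE)
--
--   currentState = 1
--
--   for i in token:
--     if currentState == 1:                            ## 1ST CHARACTER
--       if i.isdigit():
--         currentState = stateTable[1][2]              #3
--       elif i.isalpha():
--         currentState = stateTable[1][1]              #2
--       else:
--         currentState = stateTable[1][5]              #0
--     elif currentState == 2:                          ## identifier
--       if not i.isdigit() and not i.isalpha() and not i == '_' and not i == '$':
--         currentState = stateTable[2][3]              #0
--     elif currentState == 3:                          ## integer
--       if not i.isdigit() and not i == '.':
--         currentState = 0
--       elif i == ".":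
--         currentState = stateTable[3][3]              #4; otherwise remain the same
--     elif currentState == 4:
--       if not i.isdigit():
--         currentState = 0
--   return currentState
-- ===== SOURCE B (Python) =====
-- def FSM(token):
--     # Declarative classification: split the token into shape cases with whole-string
--     # predicates (isalpha/isdigit/find/slices) instead of simulating a DFA char by char.
--     if token == "":
--         return 1
--     first, rest = token[0], token[1:]
--     if first.isalpha():
--         return 2 if all(c.isalpha() or c.isdigit() or c in '_$' for c in rest) else 0
--     i = token.find('.')
--     if i < 0:
--         return 3 if token.isdigit() else 0
--     whole, frac = token[:i], token[i+1:]
--     return 4 if whole.isdigit() and (frac == '' or frac.isdigit()) else 0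
-- ===== Notes on version B (the rewrite author's own statement) =====
-- stated objective: alternative
-- what changed: Replaced A's char-by-char DFA simulation (a state variable updated through if/elif chains) by a loop-free declarative classification: dispatch on the first character, then decide with whole-string predicates (isalpha/isdigit on slices around the first '.' located by find).
import Mathlib
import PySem

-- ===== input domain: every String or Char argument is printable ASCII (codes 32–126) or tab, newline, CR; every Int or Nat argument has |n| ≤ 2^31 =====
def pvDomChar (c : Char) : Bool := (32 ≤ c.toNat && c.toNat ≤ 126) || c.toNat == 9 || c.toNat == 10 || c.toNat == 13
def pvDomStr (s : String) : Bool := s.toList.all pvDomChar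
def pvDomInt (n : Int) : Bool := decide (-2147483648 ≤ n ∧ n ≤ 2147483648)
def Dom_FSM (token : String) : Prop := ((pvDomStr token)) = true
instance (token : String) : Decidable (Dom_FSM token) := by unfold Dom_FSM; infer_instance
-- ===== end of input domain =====

-- B replaces A's char-by-char DFA simulation by a declarative, loop-free
-- classification of the whole token: first-character dispatch plus whole-string
-- predicates (isalpha/isdigit/find/slices); same O(n) cost, no state variable.

-- ===== PORT A =====
-- one iteration of A's loop body (the if/elif chain over currentState)
def pvStepA (s : Int) (c : Char) : Int :=
  if s = 1 then
    if PySem.Chars.isdigit c then 3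
    else if PySem.Chars.isalpha c then 2
    else 0
  else if s = 2 then
    if !PySem.Chars.isdigit c && !PySem.Chars.isalpha c && !(c == '_') && !(c == '$') then 0
    else s
  else if s = 3 then
    if !PySem.Chars.isdigit c && !(c == '.') then 0
    else if c == '.' then 4
    else s
  else if s = 4 then
    if !PySem.Chars.isdigit c then 0 else s
  else s

def FSM (token : String) : Int :=
  token.toList.foldl pvStepA 1

-- ===== PORT B =====
-- `all(c.isalpha() or c.isdigit() or c in '_$' for c in rest)`
def pvIdentTail (rest : List Char) : Bool :=
  rest.all (fun c => PySem.Chars.isalpha c || PySem.Chars.isdigit c || c == '_' || c == '$')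

-- the numeric branch of Source B: find the first '.', then isdigit tests on the slices
def pvNumClass (l : List Char) : Int :=
  let i := PySem.Chars.find l ['.']
  if i < 0 then
    if PySem.Chars.strIsdigit l then 3 else 0
  else
    let whole := PySem.List.slice l none (some i)
    let frac := PySem.List.slice l (some (i + 1)) none
    if PySem.Chars.strIsdigit whole && (frac == ([] : List Char) || PySem.Chars.strIsdigit frac) then 4 else 0

def FSM_alt (token : String) : Int :=
  match token.toList with
  | [] => 1                      -- if token == "": return 1
  | first :: rest =>             -- first, rest = token[0], token[1:]
    if PySem.Chars.isalpha first then
      if pvIdentTail rest then 2 else 0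
    else pvNumClass (first :: rest)

-- ===== PRECONDITION & SPEC =====
def Spec_FSM (token : String) (out : Int) : Prop := out = FSM_alt token
instance (token : String) (out : Int) : Decidable (Spec_FSM token out) := by unfold Spec_FSM; infer_instance

-- ===== CLAIM (what is proved, stated in full; the proofs are below) =====
def Claim_equal_FSM : Prop := ∀ (token : String), Dom_FSM token → Spec_FSM token (FSM token)

-- ===== LEMMAS AND PROOFS =====

lemma pv_not_digit_and_alpha (c : Char) :
    ¬ (PySem.Chars.isdigit c = true ∧ PySem.Chars.isalpha c = true) := by
  unfold PySem.Chars.isdigit PySem.Chars.isalpha PySem.Chars.isupper PySem.Chars.islower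
  simp [Char.le_def, UInt32.le_iff_toNat_le]
  omega

lemma pv_run0 (l : List Char) : l.foldl pvStepA 0 = 0 := by
  induction l with
  | nil => rfl
  | cons c t ih => simpa [pvStepA] using ih

lemma pv_run2 (l : List Char) :
    l.foldl pvStepA 2 = if pvIdentTail l then 2 else 0 := by
  induction l with
  | nil => rfl
  | cons c t ih =>
    by_cases hd : PySem.Chars.isdigit c = true <;>
    by_cases ha : PySem.Chars.isalpha c = true <;>
    by_cases h1 : c = '_' <;> by_cases h2 : c = '$' <;>
      simp [pvStepA, pvIdentTail, hd, ha, h1, h2, ih, pv_run0] at *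

lemma pv_run4 (l : List Char) :
    l.foldl pvStepA 4 = if l.all PySem.Chars.isdigit then 4 else 0 := by
  induction l with
  | nil => rfl
  | cons c t ih =>
    by_cases hd : PySem.Chars.isdigit c = true <;>
      simp [pvStepA, hd, ih, pv_run0]

lemma pv_run3_nodot (l : List Char) (h : '.' ∉ l) :
    l.foldl pvStepA 3 = if l.all PySem.Chars.isdigit then 3 else 0 := by
  induction l with
  | nil => rfl
  | cons c t ih =>
    have hc : ¬ c = '.' := fun hc => h (hc ▸ List.mem_cons_self ..)
    have ht : '.' ∉ t := fun ht => h (List.mem_cons_of_mem _ ht)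
    by_cases hd : PySem.Chars.isdigit c = true <;>
      simp [pvStepA, hd, hc, ih ht, pv_run0]

lemma pv_run3_split (a b : List Char) (ha : '.' ∉ a) :
    (a ++ '.' :: b).foldl pvStepA 3 =
      if a.all PySem.Chars.isdigit && b.all PySem.Chars.isdigit then 4 else 0 := by
  induction a with
  | nil => simp [pvStepA, pv_run4]
  | cons c t ih =>
    have hc : ¬ c = '.' := fun hc => ha (hc ▸ List.mem_cons_self ..)
    have ht : '.' ∉ t := fun ht => ha (List.mem_cons_of_mem _ ht)
    by_cases hd : PySem.Chars.isdigit c = true <;>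
      simp [pvStepA, hd, hc, ih ht, pv_run0]

-- from a nonnegative find: the token splits as (before-dot) ++ '.' :: (after-dot),
-- with no '.' before the first one
lemma pv_find_decomp (l : List Char) (h : 0 ≤ PySem.Chars.find l ['.']) :
    l = l.take (PySem.Chars.find l ['.']).toNat ++
        '.' :: l.drop ((PySem.Chars.find l ['.']).toNat + 1) ∧
      '.' ∉ l.take (PySem.Chars.find l ['.']).toNat := by
  obtain ⟨hpre, hmin⟩ := PySem.Chars.find_spec h
  set n := (PySem.Chars.find l ['.']).toNat with hn
  obtain ⟨t, ht⟩ := hpre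
  have hdrop : l.drop n = '.' :: t := by simpa using ht.symm
  constructor
  · have h1 : l.drop (n + 1) = t := by
      rw [← List.drop_drop, hdrop]; rfl
    rw [h1, ← hdrop, List.take_append_drop]
  · intro hmem
    obtain ⟨j, hj, hget⟩ := List.mem_iff_getElem.mp hmem
    have hjn : j < n := lt_of_lt_of_le hj (by simp)
    have hjl : j < l.length := lt_of_lt_of_le hj (by simp)
    have hlj : l[j] = '.' := by rw [← List.getElem_take (h := hj)]; exact hget
    apply hmin j hjn
    exact ⟨l.drop (j + 1), by rw [List.drop_eq_getElem_cons hjl, hlj]; rfl⟩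

-- the numeric branch of B agrees with running A from state 3 on the tail
lemma pv_num_eq (first : Char) (rest : List Char)
    (hd : PySem.Chars.isdigit first = true) :
    rest.foldl pvStepA 3 = pvNumClass (first :: rest) := by
  unfold pvNumClass
  by_cases hneg : PySem.Chars.find (first :: rest) ['.'] < 0
  · rw [if_pos hneg]
    have h1 : PySem.Chars.find (first :: rest) ['.'] = -1 := by
      have := PySem.Chars.neg_one_le_find (first :: rest) ['.']
      omega
    have h2 : ¬ ('.' :: []) <:+: (first :: rest) :=
      (PySem.Chars.find_eq_neg_one_iff _ _).mp h1
    have hmem : '.' ∉ rest := fun hm =>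
      h2 ((List.singleton_infix_iff _ _).mpr (List.mem_cons_of_mem _ hm))
    rw [pv_run3_nodot rest hmem]
    simp [PySem.Chars.strIsdigit, hd]
  · rw [if_neg hneg]
    have h0 : 0 ≤ PySem.Chars.find (first :: rest) ['.'] := by omega
    obtain ⟨hsplit, hnotin⟩ := pv_find_decomp (first :: rest) h0
    rw [PySem.List.slice_to _ h0,
      PySem.List.slice_from _ (by omega : (0:Int) ≤ PySem.Chars.find (first :: rest) ['.'] + 1)]
    have htn : (PySem.Chars.find (first :: rest) ['.'] + 1).toNat
        = (PySem.Chars.find (first :: rest) ['.']).toNat + 1 := by omega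
    rw [htn]
    set n := (PySem.Chars.find (first :: rest) ['.']).toNat with hn
    have hne : first ≠ '.' := by
      intro h; rw [h] at hd; exact absurd hd (by decide)
    have hn1 : 1 ≤ n := by
      by_contra hcon
      have h0n : n = 0 := by omega
      rw [h0n] at hsplit
      simp only [List.take_zero, List.nil_append] at hsplit
      exact hne (List.cons_eq_cons.mp hsplit).1
    have htake : (first :: rest).take n = first :: rest.take (n - 1) := by
      rw [show n = (n - 1) + 1 by omega]; rfl
    have hrest : rest = rest.take (n - 1) ++ '.' :: (first :: rest).drop (n + 1) := by
      nth_rewrite 1 [show rest = (first :: rest).tail from rfl]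
      nth_rewrite 1 [hsplit]
      rw [htake]
      rfl
    have hna : '.' ∉ rest.take (n - 1) := by
      rw [htake] at hnotin
      exact fun hm => hnotin (List.mem_cons_of_mem _ hm)
    nth_rewrite 1 [hrest]
    rw [pv_run3_split _ _ hna, htake]
    cases hb : (first :: rest).drop (n + 1) with
    | nil => simp [PySem.Chars.strIsdigit, hd]
    | cons x xs => simp [PySem.Chars.strIsdigit, hd]

-- the numeric branch of B rejects when the first char is not a digit
lemma pv_num_zero (first : Char) (rest : List Char)
    (hd : ¬ PySem.Chars.isdigit first = true) :
    pvNumClass (first :: rest) = 0 := by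
  unfold pvNumClass
  by_cases hneg : PySem.Chars.find (first :: rest) ['.'] < 0
  · rw [if_pos hneg]
    simp [PySem.Chars.strIsdigit, hd]
  · rw [if_neg hneg]
    have h0 : 0 ≤ PySem.Chars.find (first :: rest) ['.'] := by omega
    rw [PySem.List.slice_to _ h0]
    set n := (PySem.Chars.find (first :: rest) ['.']).toNat with hn
    rcases Nat.eq_zero_or_pos n with h | h
    · simp [h, PySem.Chars.strIsdigit]
    · have htake : (first :: rest).take n = first :: rest.take (n - 1) := by
        rw [show n = (n - 1) + 1 by omega]; rfl
      rw [htake]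
      simp [PySem.Chars.strIsdigit, hd]

-- ===== VERDICT (by name: the statement is the Claim_ definition above) =====
theorem FSM_spec : Claim_equal_FSM := by
  intro token _
  unfold Spec_FSM FSM FSM_alt
  cases hl : token.toList with
  | nil => rfl
  | cons first rest =>
    rw [List.foldl_cons]
    show _ = if PySem.Chars.isalpha first = true then (if pvIdentTail rest = true then 2 else 0)
        else pvNumClass (first :: rest)
    by_cases hd : PySem.Chars.isdigit first = true
    · have ha : ¬ PySem.Chars.isalpha first = true := fun ha =>
        pv_not_digit_and_alpha first ⟨hd, ha⟩
      have hstep : pvStepA 1 first = 3 := by simp [pvStepA, hd]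
      rw [hstep, if_neg ha]
      exact pv_num_eq first rest hd
    · by_cases ha : PySem.Chars.isalpha first = true
      · have hstep : pvStepA 1 first = 2 := by simp [pvStepA, hd, ha]
        rw [hstep, if_pos ha]
        exact pv_run2 rest
      · have hstep : pvStepA 1 first = 0 := by simp [pvStepA, hd, ha]
        rw [hstep, if_neg ha, pv_run0, pv_num_zero first rest hd]
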